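-- pv_equiv track=rewrite | github.com/metagov/d20-governance | d20_governance/utils.py | pig_latin_word
-- ===== SOURCE A (Python) =====
-- def pig_latin_word(word):
--     if word[0] in "aeiouAEIOU":
--         return word + "yay"
--     else:
--         first_consonant_cluster = ""
--         rest_of_word = word
--         for letter in word:
--             if letter not in "aeiouAEIOU":
--                 first_consonant_cluster += letter
--                 rest_of_word = rest_of_word[1:]
--             else:
--                 break
--         return rest_of_word + first_consonant_cluster + "ay"
-- ===== SOURCE B (Python) =====
-- def pig_latin_word(word):
--     if word[0] in "aeiouAEIOU":
--         return word + "yay"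
--     i = next((k for k, c in enumerate(word) if c in "aeiouAEIOU"), len(word))
--     return word[i:] + word[:i] + "ay"
-- ===== Notes on version B (the rewrite author's own statement) =====
-- stated objective: simpler
-- what changed: B finds the index of the first vowel in one enumerate scan and returns a single slice expression word[i:]+word[:i]+'ay', instead of A's loop that builds the consonant cluster by string concatenation while re-slicing the remaining word each step.
import Mathlib
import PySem

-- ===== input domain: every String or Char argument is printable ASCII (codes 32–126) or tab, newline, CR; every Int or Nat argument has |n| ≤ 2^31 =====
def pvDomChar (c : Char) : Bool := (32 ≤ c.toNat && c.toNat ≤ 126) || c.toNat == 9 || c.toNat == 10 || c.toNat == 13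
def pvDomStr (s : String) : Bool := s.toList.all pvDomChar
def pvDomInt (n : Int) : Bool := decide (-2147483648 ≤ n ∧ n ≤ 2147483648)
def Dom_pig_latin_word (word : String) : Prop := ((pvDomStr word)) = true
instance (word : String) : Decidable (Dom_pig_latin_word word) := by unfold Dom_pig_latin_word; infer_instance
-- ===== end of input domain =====

-- B replaces A's cluster-accumulating loop (with repeated word[1:] slicing) by a single
-- first-vowel-index scan and one slice expression; objective: simpler.

def pvVowel (c : Char) : Bool := c ∈ "aeiouAEIOU".toList

-- ===== PORT A =====
-- A's for-loop with break: state = (first_consonant_cluster, rest_of_word);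
-- rest_of_word[1:] is List.drop 1 (exact for the [1:] slice on a list of chars).
def pigLoopA : List Char → List Char → List Char → (List Char × List Char)
  | [], cluster, rest => (cluster, rest)
  | c :: cs, cluster, rest =>
      if !pvVowel c then pigLoopA cs (cluster ++ [c]) (rest.drop 1)
      else (cluster, rest)

def pig_latin_word (word : String) : String :=
  match word.toList with
  | [] => ""  -- word[0] raises IndexError in Python; excluded by Pre_
  | c :: _ =>
      if pvVowel c then word ++ "yay"
      else
        let p := pigLoopA word.toList [] word.toList
        String.ofList (p.2 ++ p.1 ++ "ay".toList)

-- ===== PORT B =====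
-- B's next((k for k,c in enumerate(word) if c in vowels), len(word)): counter recursion.
def pigFirstVowelIdx : List Char → Nat
  | [] => 0
  | c :: cs => if pvVowel c then 0 else 1 + pigFirstVowelIdx cs

def pig_latin_word_alt (word : String) : String :=
  match word.toList with
  | [] => ""  -- word[0] raises IndexError in Python; excluded by Pre_
  | c :: _ =>
      if pvVowel c then word ++ "yay"
      else
        let i := pigFirstVowelIdx word.toList
        String.ofList (word.toList.drop i ++ word.toList.take i ++ "ay".toList)

-- ===== PRECONDITION & SPEC =====
-- Pre_ excludes only the empty string, on which both Pythons raise IndexError at word[0].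
def Pre_pig_latin_word (word : String) : Prop := word ≠ ""
instance (word : String) : Decidable (Pre_pig_latin_word word) := by unfold Pre_pig_latin_word; infer_instance
def pvWitness_pig_latin_word : String := "hello"

def Spec_pig_latin_word (word : String) (out : String) : Prop := out = pig_latin_word_alt word
instance (word : String) (out : String) : Decidable (Spec_pig_latin_word word out) := by unfold Spec_pig_latin_word; infer_instance

-- ===== CLAIM (what is proved, stated in full; the proofs are below) =====
def Claim_equal_pig_latin_word : Prop := ∀ (word : String), Dom_pig_latin_word word → Pre_pig_latin_word word → Spec_pig_latin_word word (pig_latin_word word)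

-- ===== LEMMAS AND PROOFS =====

lemma pigLoopA_eq (cs : List Char) : ∀ (acc rest : List Char),
    pigLoopA cs acc rest =
      (acc ++ cs.take (pigFirstVowelIdx cs), rest.drop (pigFirstVowelIdx cs)) := by
  induction cs with
  | nil => intro acc rest; simp [pigLoopA, pigFirstVowelIdx]
  | cons c cs ih =>
      intro acc rest
      by_cases h : pvVowel c = true
      · simp [pigLoopA, pigFirstVowelIdx, h]
      · simp only [pigLoopA, pigFirstVowelIdx, h, Bool.not_false, if_true, if_false,
          Bool.false_eq_true, ih]
        rw [Nat.add_comm 1]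
        simp [List.take_succ_cons]

-- ===== VERDICT (by name: the statement is the Claim_ definition above) =====
theorem pig_latin_word_spec : Claim_equal_pig_latin_word := by
  intro word _ _
  unfold Spec_pig_latin_word pig_latin_word pig_latin_word_alt
  cases hw : word.toList with
  | nil => rfl
  | cons c cs =>
      by_cases h : pvVowel c = true
      · simp [h]
      · simp [h, pigLoopA_eq]
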